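-- pv_equiv track=rewrite | github.com/intangere/dissent | dissent.py | mem_to_program
-- ===== SOURCE A (Python) =====
-- def find_program_end(mem):
--     i = len(mem) - 1
--     end = None
--     while i > 0:
--        op = mem[i]
--        if op != 0:
--           end = i
--           break
--        i -= 1
--
--     return end
--
-- def mem_to_program(mem):
--     end = find_program_end(mem)
--     program = ''
--     i = 0
--     while i < end+1:
--        program += chr(mem[i])
--        i += 1
--     return program
-- ===== SOURCE B (Python) =====
-- def mem_to_program(mem):
--     # forward pass: remember the last nonzero index >= 1, then emit the prefix in one slice
--     end = None
--     for i in range(1, len(mem)):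
--         if mem[i] != 0:
--             end = i
--     return ''.join(chr(c) for c in mem[:end+1])
-- ===== Notes on version B (the rewrite author's own statement) =====
-- stated objective: faster
-- what changed: Replaces the backward while-loop search plus quadratic char-by-char string concatenation with a single forward pass remembering the last nonzero index and one linear join over a slice.
-- outside the precondition, e.g. on mem_to_program([0, 0, 0]): A raises TypeError, B raises TypeError; on mem_to_program([65, -1]): A raises ValueError, B raises ValueError
import Mathlib
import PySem

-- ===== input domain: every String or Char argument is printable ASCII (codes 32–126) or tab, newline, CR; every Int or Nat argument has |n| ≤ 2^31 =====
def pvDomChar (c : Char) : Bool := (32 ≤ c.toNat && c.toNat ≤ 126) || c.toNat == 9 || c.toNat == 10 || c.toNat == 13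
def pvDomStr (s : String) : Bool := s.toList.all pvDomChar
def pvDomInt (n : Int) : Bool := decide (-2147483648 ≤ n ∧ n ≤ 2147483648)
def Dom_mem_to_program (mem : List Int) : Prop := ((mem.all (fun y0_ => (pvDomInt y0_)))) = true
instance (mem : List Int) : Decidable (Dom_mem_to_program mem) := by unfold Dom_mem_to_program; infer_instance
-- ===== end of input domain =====

-- B replaces A's backward while-loop search and char-by-char string building by one
-- forward pass remembering the last nonzero index and a single join over a slice, avoiding
-- A's repeated string concatenation (objective: faster, measured).

-- ===== PORT A =====
-- chr(c): exact for the code points admitted by Pre_ (0 ≤ c, valid non-surrogate scalar value)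
def pyChr (c : Int) : Char := Char.ofNat c.toNat

-- while i > 0: backward scan; fuel is the current index i (indices used are always in range)
def fpeLoop (mem : List Int) : Nat → Option Int
  | 0 => none
  | Nat.succ i => if mem.getD (i + 1) 0 ≠ 0 then some ((i : Int) + 1) else fpeLoop mem i

def find_program_end (mem : List Int) : Option Int := fpeLoop mem (mem.length - 1)

-- while i < end+1: program += chr(mem[i]) (string modelled as List Char, wrapped by String.ofList)
def mtpLoop (mem : List Int) (stop i : Nat) (acc : List Char) : List Char :=
  if i < stop then mtpLoop mem stop (i + 1) (acc ++ [pyChr (mem.getD i 0)]) else acc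
termination_by stop - i

def mem_to_program (mem : List Int) : String :=
  match find_program_end mem with
  | none => ""   -- Python raises TypeError (None + 1) here; excluded by Pre_
  | some e => String.ofList (mtpLoop mem (e.toNat + 1) 0 [])

-- ===== PORT B =====
def mem_to_program_alt (mem : List Int) : String :=
  match (PySem.List.pyRange 1 (mem.length : Int) 1).foldl
      (fun acc i => if PySem.List.pyGetD mem i 0 ≠ 0 then some i else acc) none with
  | none => ""   -- Python raises TypeError (None + 1) here; excluded by Pre_
  | some e => String.ofList ((PySem.List.slice mem none (some (e + 1))).map pyChr)

-- ===== PRECONDITION & SPEC =====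
def pvValidChr (c : Int) : Bool := 0 ≤ c && c ≤ 1114111 && !(55296 ≤ c && c < 57344)

-- Pre_ excludes (a) inputs with no nonzero entry at an index ≥ 1, where A raises TypeError (None+1);
-- (b) inputs whose emitted prefix contains a negative or > 0x10FFFF code, where chr raises ValueError;
-- (c) inputs whose emitted prefix contains a surrogate code point 0xD800–0xDFFF, where A returns a
-- lone-surrogate string that is not a value of the Lean String type (not UTF-8 encodable).
def Pre_mem_to_program (mem : List Int) : Prop :=
  (∃ j < mem.length, 1 ≤ j ∧ mem.getD j 0 ≠ 0) ∧
  (∀ i < mem.length, (∃ j < mem.length, i ≤ j ∧ 1 ≤ j ∧ mem.getD j 0 ≠ 0) → pvValidChr (mem.getD i 0) = true)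

instance (mem : List Int) : Decidable (Pre_mem_to_program mem) := by
  unfold Pre_mem_to_program; infer_instance

def pvWitness_mem_to_program : List Int := [72, 105, 0, 0]

def Spec_mem_to_program (mem : List Int) (out : String) : Prop := out = mem_to_program_alt mem
instance (mem : List Int) (out : String) : Decidable (Spec_mem_to_program mem out) := by unfold Spec_mem_to_program; infer_instance

-- ===== CLAIM (what is proved, stated in full; the proofs are below) =====
def Claim_equal_mem_to_program : Prop := ∀ (mem : List Int), Dom_mem_to_program mem → Pre_mem_to_program mem → Spec_mem_to_program mem (mem_to_program mem)

-- ===== LEMMAS AND PROOFS =====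

-- A's backward scan with fuel n equals B's forward fold over range(1, n+1)
theorem fpeLoop_eq_foldl (mem : List Int) (n : Nat) :
    fpeLoop mem n =
      (PySem.List.pyRange 1 ((n : Int) + 1) 1).foldl
        (fun acc i => if PySem.List.pyGetD mem i 0 ≠ 0 then some i else acc) none := by
  induction n with
  | zero => simp [fpeLoop, PySem.List.pyRange_one_eq_nil]
  | succ n ih =>
      push_cast
      rw [PySem.List.pyRange_one_succ_right (a := 1) (b := (n : Int) + 1) (by omega), List.foldl_append]
      simp only [List.foldl_cons, List.foldl_nil, fpeLoop, ← ih]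
      have h : PySem.List.pyGetD mem ((n : Int) + 1) 0 = mem.getD (n + 1) 0 := by
        rw [show ((n : Int) + 1) = ((n + 1 : Nat) : Int) by push_cast; ring,
          PySem.List.pyGetD_natCast]
      rw [h]

theorem foldl_last_mem {α : Type} (P : α → Prop) [DecidablePred P] (l : List α) (acc : Option α)
    (e : α) (h : l.foldl (fun acc i => if P i then some i else acc) acc = some e) :
    e ∈ l ∨ acc = some e := by
  induction l generalizing acc with
  | nil => simp_all
  | cons x xs ih =>
      rcases ih _ h with h1 | h1
      · exact Or.inl (List.mem_cons_of_mem _ h1)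
      · by_cases hx : P x
        · simp [hx] at h1; exact Or.inl (by simp [h1])
        · simp [hx] at h1; exact Or.inr h1

-- the string-building loop appends the chr-image of mem[i:stop]
theorem mtpLoop_eq (mem : List Int) (stop : Nat) (hstop : stop ≤ mem.length) :
    ∀ i acc, mtpLoop mem stop i acc = acc ++ (((mem.drop i).take (stop - i)).map pyChr) := by
  intro i
  induction hi : stop - i using Nat.strong_induction_on generalizing i with
  | _ k ih =>
    intro acc
    rw [mtpLoop]
    by_cases h : i < stop
    · have hil : i < mem.length := lt_of_lt_of_le h hstop
      have hdrop : mem.drop i = mem[i] :: mem.drop (i + 1) :=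
        (List.getElem_cons_drop hil).symm
      rw [if_pos h, ih (stop - (i + 1)) (by omega) (i + 1) rfl, hdrop,
        show k = (stop - (i + 1)) + 1 by omega, List.take_succ_cons, List.map_cons]
      have hg : mem.getD i 0 = mem[i] := by simp [List.getD_eq_getElem?_getD, hil]
      rw [hg]; simp
    · rw [if_neg h, show k = 0 by omega]
      simp

theorem ends_eq (mem : List Int) :
    find_program_end mem =
      (PySem.List.pyRange 1 (mem.length : Int) 1).foldl
        (fun acc i => if PySem.List.pyGetD mem i 0 ≠ 0 then some i else acc) none := by
  unfold find_program_end
  rw [fpeLoop_eq_foldl]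
  rcases Nat.eq_zero_or_pos mem.length with h | h
  · rw [h]; norm_num
  · rw [show ((mem.length - 1 : Nat) : Int) + 1 = (mem.length : Int) by omega]

-- ===== VERDICT (by name: the statement is the Claim_ definition above) =====
theorem mem_to_program_spec : Claim_equal_mem_to_program := by
  intro mem _ _
  unfold Spec_mem_to_program mem_to_program mem_to_program_alt
  rw [ends_eq]
  cases he : (PySem.List.pyRange 1 (mem.length : Int) 1).foldl
      (fun acc i => if PySem.List.pyGetD mem i 0 ≠ 0 then some i else acc) none with
  | none => rfl
  | some e =>
      dsimp only
      have hmem : e ∈ PySem.List.pyRange 1 (mem.length : Int) 1 := by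
        rcases foldl_last_mem (fun i => PySem.List.pyGetD mem i 0 ≠ 0) _ none e he with h | h
        · exact h
        · simp at h
      rw [PySem.List.mem_pyRange_one] at hmem
      have h1 : (1 : Int) ≤ e := hmem.1
      have h2 : e < (mem.length : Int) := hmem.2
      have hle : e.toNat + 1 ≤ mem.length := by omega
      rw [mtpLoop_eq mem (e.toNat + 1) hle 0 []]
      simp only [List.drop_zero, Nat.sub_zero, List.nil_append]
      rw [PySem.List.slice_to mem (by omega), show (e + 1).toNat = e.toNat + 1 by omega]
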